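-- pv_equiv track=rewrite | github.com/Remintonnn/meterial-box-generator-for-one-very-specific-redstone-contraption | main.py | checkBlock
-- ===== SOURCE A (Python) =====
-- BlackBlockList = ["minecraft:honey_block","minecraft:slime_block","minecraft:redstone_block","minecraft:cobweb","minecraft:brewing_stand","minecraft:jukebox","minecraft:bedrock","minecraft:snow","minecraft:pumpkin","minecraft:melon","minecraft:moss_block","minecraft:beacon","minecraft:sculk_catalyst","minecraft:sculk_shrieker","minecraft:sculk_sensor","minecraft:scaffolding","minecraft:sculk_vein","minecraft:pointed_dripstone","minecraft:decorated_pot","minecraft:glow_lichen","minecraft:sand","minecraft:red_sand","minecraft:gravel","*concrete_powder","*shulker_box","*glazed_terracotta","*slab","*candle","*pressure","trapdoor","*moss", "*carpet", "*leaves", "*glass_pane"]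
--
-- grassyBlockList = ["minecraft:grass_block","minecraft:mycelium","minecraft:crimson_nylium","minecraft:warped_nylium"]
--
-- nonRecycleableBlockList = ["minecraft:stone", "minecraft:deepslate", "minecraft:clay", "minecraft:packed_ice", "minecraft:blue_ice", "minecraft:mushroom_stem","minecraft:sea_lantern"]
--
-- def checkBlock(block):
--     def checkMatch(btc:str):
--         if btc.startswith('*'):
--             if btc[1:] in block:
--                 # tqdm.write(f"found {block} maching {btc}")
--                 return True
--         elif block == btc:
--             # tqdm.write(f"found {block} == {btc}")
--             return True
--         return False
--
--     for btc in BlackBlockList: # unsupported block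
--         if checkMatch(btc):return -1
--
--     for btc in grassyBlockList: # grassy block
--         if checkMatch(btc):return -2
--
--     for btc in nonRecycleableBlockList: # non recycleable block
--         if checkMatch(btc):return -3
--
--     return 1 # ok block
-- ===== SOURCE B (Python) =====
-- # B: flatten the three tiers into one exact-pattern -> code dict plus a flat
-- # (wildcard substring, code) list; since higher-priority tiers carry larger
-- # (less negative) codes, the first-matching-tier result is simply the MAX of
-- # all matching codes (default 1) -- no tiered early-return loops at all.
--
-- BlackBlockList = ["minecraft:honey_block","minecraft:slime_block","minecraft:redstone_block","minecraft:cobweb","minecraft:brewing_stand","minecraft:jukebox","minecraft:bedrock","minecraft:snow","minecraft:pumpkin","minecraft:melon","minecraft:moss_block","minecraft:beacon","minecraft:sculk_catalyst","minecraft:sculk_shrieker","minecraft:sculk_sensor","minecraft:scaffolding","minecraft:sculk_vein","minecraft:pointed_dripstone","minecraft:decorated_pot","minecraft:glow_lichen","minecraft:sand","minecraft:red_sand","minecraft:gravel","*concrete_powder","*shulker_box","*glazed_terracotta","*slab","*candle","*pressure","trapdoor","*moss", "*carpet", "*leaves", "*glass_pane"]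
--
-- grassyBlockList = ["minecraft:grass_block","minecraft:mycelium","minecraft:crimson_nylium","minecraft:warped_nylium"]
--
-- nonRecycleableBlockList = ["minecraft:stone", "minecraft:deepslate", "minecraft:clay", "minecraft:packed_ice", "minecraft:blue_ice", "minecraft:mushroom_stem","minecraft:sea_lantern"]
--
-- _EXACT = {}
-- _WILD = []
-- for _code, _patterns in ((-1, BlackBlockList), (-2, grassyBlockList), (-3, nonRecycleableBlockList)):
--     for _p in _patterns:
--         if _p.startswith('*'):
--             _WILD.append((_p[1:], _code))
--         else:
--             _EXACT[_p] = _code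
--
-- def checkBlock(block):
--     codes = [c for w, c in _WILD if w in block]
--     if block in _EXACT:
--         codes.append(_EXACT[block])
--     return max(codes, default=1)
-- ===== Notes on version B (the rewrite author's own statement) =====
-- stated objective: alternative
-- what changed: B abandons the three tiered early-return loops entirely: it flattens all patterns once into a single exact-pattern->code dict plus a flat (wildcard substring, code) list, and checkBlock returns the MAX of the codes of all matching patterns (default 1), which equals A's first-matching-tier result because higher-priority tiers carry larger codes.
import Mathlib
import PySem

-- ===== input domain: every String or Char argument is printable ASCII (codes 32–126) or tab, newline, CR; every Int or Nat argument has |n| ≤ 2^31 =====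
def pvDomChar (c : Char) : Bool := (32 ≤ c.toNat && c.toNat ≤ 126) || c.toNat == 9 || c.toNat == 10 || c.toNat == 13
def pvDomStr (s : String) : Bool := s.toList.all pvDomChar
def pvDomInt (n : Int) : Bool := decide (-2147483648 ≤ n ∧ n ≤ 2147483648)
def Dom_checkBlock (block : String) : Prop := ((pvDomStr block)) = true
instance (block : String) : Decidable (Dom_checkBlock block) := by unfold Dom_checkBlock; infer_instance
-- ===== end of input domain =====

-- B flattens the tiered pattern lists into one exact dict + one wildcard list and returns
-- the max of all matching codes (default 1) instead of three staged early-return loops (alternative).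

-- ===== PORT A =====
def pvBlackBlockList : List String := ["minecraft:honey_block","minecraft:slime_block","minecraft:redstone_block","minecraft:cobweb","minecraft:brewing_stand","minecraft:jukebox","minecraft:bedrock","minecraft:snow","minecraft:pumpkin","minecraft:melon","minecraft:moss_block","minecraft:beacon","minecraft:sculk_catalyst","minecraft:sculk_shrieker","minecraft:sculk_sensor","minecraft:scaffolding","minecraft:sculk_vein","minecraft:pointed_dripstone","minecraft:decorated_pot","minecraft:glow_lichen","minecraft:sand","minecraft:red_sand","minecraft:gravel","*concrete_powder","*shulker_box","*glazed_terracotta","*slab","*candle","*pressure","trapdoor","*moss", "*carpet", "*leaves", "*glass_pane"]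

def pvGrassyBlockList : List String := ["minecraft:grass_block","minecraft:mycelium","minecraft:crimson_nylium","minecraft:warped_nylium"]

def pvNonRecycleableBlockList : List String := ["minecraft:stone", "minecraft:deepslate", "minecraft:clay", "minecraft:packed_ice", "minecraft:blue_ice", "minecraft:mushroom_stem","minecraft:sea_lantern"]

-- inner 'def checkMatch(btc)': '*'-prefixed patterns match as substrings, others exactly
def pvCheckMatch (block btc : String) : Bool :=
  if PySem.Str.startswith btc "*" then
    PySem.Str.isIn (PySem.Str.slice btc (some 1) none) block
  else
    block == btc

-- the three 'for … return' loops: first matching category wins, else 1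
def checkBlock (block : String) : Int :=
  if pvBlackBlockList.any (pvCheckMatch block) then -1
  else if pvGrassyBlockList.any (pvCheckMatch block) then -2
  else if pvNonRecycleableBlockList.any (pvCheckMatch block) then -3
  else 1

-- ===== PORT B =====
-- module-level build loop of Source B: _EXACT dict and _WILD list over the flattened tiers
def pvTiers : List (Int × List String) :=
  [(-1, pvBlackBlockList), (-2, pvGrassyBlockList), (-3, pvNonRecycleableBlockList)]

def pvBuild : PySem.Dict String Int × List (String × Int) :=
  pvTiers.foldl (fun acc t =>
    t.2.foldl (fun acc p =>
      if PySem.Str.startswith p "*" then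
        (acc.1, acc.2 ++ [(PySem.Str.slice p (some 1) none, t.1)])
      else
        (acc.1.insert p t.1, acc.2)) acc)
    (PySem.Dict.empty, [])

def pvExact : PySem.Dict String Int := pvBuild.1
def pvWild : List (String × Int) := pvBuild.2

-- 'codes = [c for w, c in _WILD if w in block]; if block in _EXACT: codes.append(_EXACT[block]); return max(codes, default=1)'
def checkBlock_alt (block : String) : Int :=
  let codes := (pvWild.filter (fun wc => PySem.Str.isIn wc.1 block)).map Prod.snd
  let codes := if pvExact.contains block then codes ++ [pvExact.getD block 0] else codes
  PySem.List.maxD codes (fun x => x) 1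

-- ===== PRECONDITION & SPEC =====
def Spec_checkBlock (block : String) (out : Int) : Prop := out = checkBlock_alt block
instance (block : String) (out : Int) : Decidable (Spec_checkBlock block out) := by unfold Spec_checkBlock; infer_instance

-- ===== CLAIM =====
def Claim_equal_checkBlock : Prop := ∀ (block : String), Dom_checkBlock block → Spec_checkBlock block (checkBlock block)

-- ===== LEMMAS AND PROOFS =====
-- proof-side literal decompositions of the pattern lists
def pvWildSubs : List String := ["concrete_powder","shulker_box","glazed_terracotta","slab","candle","pressure","moss","carpet","leaves","glass_pane"]
def pvBlackExact : List String := ["minecraft:honey_block","minecraft:slime_block","minecraft:redstone_block","minecraft:cobweb","minecraft:brewing_stand","minecraft:jukebox","minecraft:bedrock","minecraft:snow","minecraft:pumpkin","minecraft:melon","minecraft:moss_block","minecraft:beacon","minecraft:sculk_catalyst","minecraft:sculk_shrieker","minecraft:sculk_sensor","minecraft:scaffolding","minecraft:sculk_vein","minecraft:pointed_dripstone","minecraft:decorated_pot","minecraft:glow_lichen","minecraft:sand","minecraft:red_sand","minecraft:gravel","trapdoor"]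

set_option maxRecDepth 4096 in
theorem pvWild_eq : pvWild = pvWildSubs.map (fun w => (w, (-1 : Int))) := by decide

set_option maxRecDepth 8192 in
theorem pvExact_eq :
    pvExact = PySem.Dict.mk (pvBlackExact.map (fun k => (k, (-1 : Int)))
      ++ pvGrassyBlockList.map (fun k => (k, (-2 : Int)))
      ++ pvNonRecycleableBlockList.map (fun k => (k, (-3 : Int)))) := by decide

theorem pv_get?_section {ν : Type} (ks : List String) (c : ν) (rest : List (String × ν)) (b : String) :
    (PySem.Dict.mk (ks.map (fun k => (k, c)) ++ rest)).get? b
      = if ks.any (fun k => b == k) then some c else (PySem.Dict.mk rest).get? b := by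
  induction ks with
  | nil => simp
  | cons k t ih =>
    by_cases h : k = b
    · simp [PySem.Dict.get?_mk_cons, h]
    · have h' : ¬b = k := fun hb => h hb.symm
      simp [PySem.Dict.get?_mk_cons, h, h', ih]

theorem pv_get?_exact (b : String) :
    pvExact.get? b
      = if pvBlackExact.any (fun k => b == k) then some (-1)
        else if pvGrassyBlockList.any (fun k => b == k) then some (-2)
        else if pvNonRecycleableBlockList.any (fun k => b == k) then some (-3)
        else none := by
  rw [pvExact_eq, List.append_assoc, pv_get?_section, pv_get?_section,
      ← List.append_nil (pvNonRecycleableBlockList.map (fun k => (k, (-3 : Int)))), pv_get?_section]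
  rfl

set_option maxHeartbeats 2000000 in
theorem pv_black_cond (b : String) :
    pvBlackBlockList.any (pvCheckMatch b)
      = (pvWildSubs.any (fun w => PySem.Str.isIn w b) || pvBlackExact.any (fun k => b == k)) := by
  rw [Bool.eq_iff_iff]
  simp [pvCheckMatch, pvBlackBlockList, pvBlackExact, pvWildSubs, PySem.Chars.startswith,
        List.isPrefixOf, PySem.List.slice_from_one, Bool.beq_eq_decide_eq]
  tauto

set_option maxHeartbeats 1000000 in
theorem pv_grassy_cond (b : String) :
    pvGrassyBlockList.any (pvCheckMatch b) = pvGrassyBlockList.any (fun k => b == k) := by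
  rw [Bool.eq_iff_iff]
  simp [pvCheckMatch, pvGrassyBlockList, PySem.Chars.startswith, List.isPrefixOf,
        Bool.beq_eq_decide_eq]

set_option maxHeartbeats 1000000 in
theorem pv_nonrec_cond (b : String) :
    pvNonRecycleableBlockList.any (pvCheckMatch b) = pvNonRecycleableBlockList.any (fun k => b == k) := by
  rw [Bool.eq_iff_iff]
  simp [pvCheckMatch, pvNonRecycleableBlockList, PySem.Chars.startswith, List.isPrefixOf,
        Bool.beq_eq_decide_eq]

-- max(codes, default=1) on a list whose head is -1 and whose elements are all ≤ -1 is -1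
theorem pv_maxD_neg_one (t : List Int) (hmem : ∀ x ∈ t, x ≤ -1) :
    PySem.List.maxD ((-1) :: t) (fun x => x) 1 = -1 := by
  unfold PySem.List.maxD
  rw [PySem.List.max?_id_cons]
  have h1 := PySem.List.le_foldl_max t (-1)
  have h2 := PySem.List.foldl_max_mem t (-1)
  rcases h2 with h | h
  · simp [h]
  · have := hmem _ h
    simp only [Option.getD_some]
    omega

-- ===== VERDICT (by name: the statement is the Claim_ definition above) =====
theorem checkBlock_spec : Claim_equal_checkBlock := by
  intro block _
  unfold Spec_checkBlock checkBlock checkBlock_alt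
  rw [pv_black_cond, pv_grassy_cond, pv_nonrec_cond, pvWild_eq]
  rw [PySem.Dict.getD_eq_get?_getD, PySem.Dict.contains_eq_isSome_get?, pv_get?_exact]
  rw [List.filter_map, List.map_map]
  simp only [Function.comp_def]
  cases hw : pvWildSubs.any (fun w => PySem.Str.isIn w block) with
  | false =>
    have hnil : pvWildSubs.filter (fun w => PySem.Str.isIn w block) = [] := by
      rw [List.filter_eq_nil_iff]
      intro w hwm
      have := (List.any_eq_false.mp hw) w hwm
      simpa using this
    rw [hnil]
    cases _hm1 : pvBlackExact.any (fun k => block == k) <;>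
      cases _hm2 : pvGrassyBlockList.any (fun k => block == k) <;>
        cases _hm3 : pvNonRecycleableBlockList.any (fun k => block == k) <;>
          simp [PySem.List.maxD, PySem.List.max?]
  | true =>
    simp only [Bool.true_or, if_true]
    obtain ⟨f, t, hft⟩ : ∃ f t, pvWildSubs.filter (fun w => PySem.Str.isIn w block) = f :: t := by
      rcases hfe : pvWildSubs.filter (fun w => PySem.Str.isIn w block) with _ | ⟨f, t⟩
      · exfalso
        rw [List.filter_eq_nil_iff] at hfe
        rcases List.any_eq_true.mp hw with ⟨w, hwm, hwi⟩
        exact absurd hwi (by simpa using hfe w hwm)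
      · exact ⟨f, t, rfl⟩
    rw [hft, List.map_cons]
    set o : Option Int := (if (pvBlackExact.any fun k => block == k) = true then some (-1 : Int)
          else if (pvGrassyBlockList.any fun k => block == k) = true then some (-2)
          else if (pvNonRecycleableBlockList.any fun k => block == k) = true then some (-3)
          else none) with ho
    have hov : ∀ v, o = some v → v ≤ -1 := by
      intro v hv
      rw [ho] at hv
      split_ifs at hv <;> simp_all <;> omega
    cases hc : o with
    | none =>
      simp only [Option.isSome_none, Bool.false_eq_true, if_false]
      refine (pv_maxD_neg_one _ ?_).symm
      intro x hx
      rcases List.mem_map.mp hx with ⟨w, _, rfl⟩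
      omega
    | some v =>
      simp only [Option.isSome_some, if_true, Option.getD_some, List.cons_append]
      refine (pv_maxD_neg_one _ ?_).symm
      intro x hx
      rcases List.mem_append.mp hx with hx | hx
      · rcases List.mem_map.mp hx with ⟨w, _, rfl⟩; omega
      · have hx' : x = v := List.mem_singleton.mp hx
        exact hx' ▸ hov v hc
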